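-- pv_equiv track=rewrite | github.com/captainbarmaley/Learn | Python/8-bit_summator.py | add_8bit
-- ===== SOURCE A (Python) =====
-- def full_adder(a, b, carry_in):
--     sum = (a ^ b) ^ carry_in
--     carry_out = (a & b) | (carry_in & (a ^ b))
--     return sum, carry_out
--
-- def add_8bit(a, b):
--     result = 0
--     carry = 0
--
--
--     for i in range(8):
--         a_bit = (a >> i) & 1
--         b_bit = (b >> i) & 1
--
--         sum_bit, carry = full_adder(a_bit, b_bit, carry)
--
--         result |= (sum_bit << i)
--
--     result |= (carry << 8)
--     return result
-- ===== SOURCE B (Python) =====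
-- def add_8bit(a, b):
--     # closed form: ripple-carry sum of the two low bytes, incl. carry into bit 8
--     return (a & 0xFF) + (b & 0xFF)
-- ===== Notes on version B (the rewrite author's own statement) =====
-- stated objective: faster
-- what changed: replaces the 8-iteration ripple-carry loop with full_adder logic by the closed form (a & 0xFF) + (b & 0xFF), which equals the 9-bit sum the loop assembles bit by bit
import Mathlib
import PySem

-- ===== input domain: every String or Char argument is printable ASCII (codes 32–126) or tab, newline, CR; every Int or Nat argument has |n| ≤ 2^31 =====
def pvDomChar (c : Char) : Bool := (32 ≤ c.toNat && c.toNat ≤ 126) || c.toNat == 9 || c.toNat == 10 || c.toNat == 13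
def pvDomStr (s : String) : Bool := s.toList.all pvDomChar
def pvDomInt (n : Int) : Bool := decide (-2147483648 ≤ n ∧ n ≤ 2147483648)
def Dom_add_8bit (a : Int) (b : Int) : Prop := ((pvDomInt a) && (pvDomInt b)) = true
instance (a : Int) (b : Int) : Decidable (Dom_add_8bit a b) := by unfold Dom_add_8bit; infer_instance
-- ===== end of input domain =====

-- B replaces A's 8-iteration ripple-carry loop (full_adder per bit) by the closed form (a & 255) + (b & 255); same value, O(1).


-- ===== PORT A =====
def full_adder (a : Int) (b : Int) (carry_in : Int) : Int × Int :=
  let sum := PySem.Int.bxor (PySem.Int.bxor a b) carry_in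
  let carry_out := PySem.Int.bor (PySem.Int.band a b) (PySem.Int.band carry_in (PySem.Int.bxor a b))
  (sum, carry_out)

-- the loop body of A (state = (result, carry)); i ∈ range(8) is nonnegative, so `>>> i.toNat` is Python's `>> i` exactly
def addStep (a : Int) (b : Int) (st : Int × Int) (i : Int) : Int × Int :=
  let a_bit := PySem.Int.band (a >>> i.toNat) 1
  let b_bit := PySem.Int.band (b >>> i.toNat) 1
  let sc := full_adder a_bit b_bit st.2
  (PySem.Int.bor st.1 (sc.1 <<< i.toNat), sc.2)

def add_8bit (a : Int) (b : Int) : Int :=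
  let st := (PySem.List.pyRange 0 8 1).foldl (addStep a b) (0, 0)
  PySem.Int.bor st.1 (st.2 <<< (8:Nat))

-- ===== PORT B =====
def add_8bit_alt (a : Int) (b : Int) : Int :=
  PySem.Int.band a 255 + PySem.Int.band b 255

-- ===== PRECONDITION & SPEC =====
def Spec_add_8bit (a : Int) (b : Int) (out : Int) : Prop := out = add_8bit_alt a b
instance (a : Int) (b : Int) (out : Int) : Decidable (Spec_add_8bit a b out) := by unfold Spec_add_8bit; infer_instance

-- ===== CLAIM (what is proved, stated in full; the proofs are below) =====
def Claim_equal_add_8bit : Prop := ∀ (a : Int) (b : Int), Dom_add_8bit a b → Spec_add_8bit a b (add_8bit a b)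

-- ===== LEMMAS AND PROOFS =====

-- low-byte mask on Nat is mod 256
theorem pv_maskNat (n : Nat) : n &&& 255 = n % 256 := by
  have h := Nat.and_two_pow_sub_one_eq_mod n 8
  norm_num at h
  exact h

-- Python's  x & 255  is  x % 256  (floor mod), for every integer x
theorem pv_band255 (x : Int) : PySem.Int.band x 255 = x % 256 := by
  unfold PySem.Int.band
  by_cases h : 0 ≤ x
  · rw [if_pos h, if_pos (by norm_num : (0:Int) ≤ 255)]
    have h1 : (255:Int).toNat = 255 := rfl
    rw [h1, pv_maskNat]
    omega
  · rw [if_neg h, if_pos (by norm_num : (0:Int) ≤ 255)]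
    have h1 : (255:Int).toNat = 255 := rfl
    rw [h1, Nat.and_comm, pv_maskNat]
    omega

-- Python's  (x >> k) & 1  is the k-th bit  (x / 2^k) % 2
theorem pv_bit (x : Int) (k : Nat) : PySem.Int.band (x >>> k) 1 = x / 2 ^ k % 2 := by
  rw [PySem.Int.band_one, Int.shiftRight_eq_div_pow]
  unfold PySem.Int.mod
  rw [Int.fmod_eq_emod]
  push_cast
  simp

-- the full adder on 0/1 inputs computes sum and carry of x + y + c
theorem pv_fa (x y c : Int) (hx : x = 0 ∨ x = 1) (hy : y = 0 ∨ y = 1) (hc : c = 0 ∨ c = 1) :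
    full_adder x y c = ((x + y + c) % 2, (x + y + c) / 2) := by
  rcases hx with rfl | rfl <;> rcases hy with rfl | rfl <;> rcases hc with rfl | rfl <;> decide

-- or-ing a single high bit onto a value below it is addition
theorem pv_lorAdd (r s : Int) (k : Nat) (h0 : 0 ≤ r) (h1 : r < 2 ^ k) (hs : s = 0 ∨ s = 1) :
    PySem.Int.bor r (s <<< k) = r + s * 2 ^ k := by
  rcases hs with rfl | rfl
  · simp
  · have hsh : (1:Int) <<< k = 2 ^ k := by
      rw [Int.shiftLeft_eq]
      simp
    rw [hsh, PySem.Int.bor_of_nonneg h0 (by positivity)]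
    have h2 : ((2:Int) ^ k).toNat = 2 ^ k := by
      rw [show ((2:Int) ^ k) = ((2 ^ k : Nat) : Int) by push_cast; ring]
      exact Int.toNat_natCast _
    rw [h2]
    have hlt : r.toNat < 2 ^ k := by omega
    have h3 := Nat.two_pow_add_eq_or_of_lt hlt
    have hknn : (0:Int) ≤ 2 ^ k := by positivity
    have h4 := h3 1
    rw [Nat.mul_one] at h4
    rw [Nat.or_comm r.toNat (2 ^ k), ← h4]
    omega

-- splitting a floor-mod by a doubled modulus into low part and next bit
theorem pv_emod_double (x p : Int) (hp : 0 < p) :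
    x % (2 * p) = x % p + p * (x / p % 2) := by
  have hdd : x / p / 2 = x / (p * 2) := Int.ediv_ediv_of_nonneg (by linarith)
  rw [show p * 2 = 2 * p from mul_comm p 2] at hdd
  have h1 := Int.emod_add_ediv x p
  have h2 := Int.emod_add_ediv (x / p) 2
  have h3 := Int.emod_add_ediv x (2 * p)
  linear_combination h3 - h1 - p * h2 + 2 * p * hdd

-- one ripple step of arithmetic: the doubled-modulus residues decompose through sum bit and carry
theorem pv_step_arith (a b : Int) (n : Nat) :
    a % (2 * 2 ^ n) + b % (2 * 2 ^ n)
      = ((a % 2 ^ n + b % 2 ^ n) % 2 ^ n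
          + (a / 2 ^ n % 2 + b / 2 ^ n % 2 + (a % 2 ^ n + b % 2 ^ n) / 2 ^ n) % 2 * 2 ^ n)
        + 2 * 2 ^ n * ((a / 2 ^ n % 2 + b / 2 ^ n % 2 + (a % 2 ^ n + b % 2 ^ n) / 2 ^ n) / 2) := by
  have hp : (0:Int) < 2 ^ n := by positivity
  have hda := pv_emod_double a (2 ^ n) hp
  have hdb := pv_emod_double b (2 ^ n) hp
  have h1 := Int.emod_add_ediv (a % 2 ^ n + b % 2 ^ n) (2 ^ n)
  have h2 := Int.emod_add_ediv (a / 2 ^ n % 2 + b / 2 ^ n % 2 + (a % 2 ^ n + b % 2 ^ n) / 2 ^ n) 2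
  linear_combination hda + hdb - h1 - (2 ^ n : Int) * h2

-- quotient/remainder characterisation used to read the step result back as % and /
theorem pv_split (p u v : Int) (hp : 0 < p) (hu0 : 0 ≤ u) (hu1 : u < 2 * p) :
    (u + 2 * p * v) % (2 * p) = u ∧ (u + 2 * p * v) / (2 * p) = v := by
  constructor
  · rw [Int.add_mul_emod_self_left]
    exact Int.emod_eq_of_lt hu0 hu1
  · rw [Int.add_mul_ediv_left _ _ (by linarith : (2 * p) ≠ 0)]
    rw [Int.ediv_eq_zero_of_lt hu0 hu1]
    ring

-- loop invariant: after n iterations, (result, carry) = (S % 2^n, S / 2^n) with S = a % 2^n + b % 2^n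
theorem pv_inv (a b : Int) (n : Nat) :
    (PySem.List.pyRange 0 (n : Int) 1).foldl (addStep a b) (0, 0)
      = ((a % 2 ^ n + b % 2 ^ n) % 2 ^ n, (a % 2 ^ n + b % 2 ^ n) / 2 ^ n) := by
  induction n with
  | zero => simp
  | succ n ih =>
    have hsplit : PySem.List.pyRange 0 ((n + 1 : Nat) : Int) 1
        = PySem.List.pyRange 0 (n : Int) 1 ++ [(n : Int)] := by
      rw [PySem.List.pyRange_one, PySem.List.pyRange_one]
      simp [List.range_succ]
    rw [hsplit, List.foldl_append, ih]
    simp only [List.foldl_cons, List.foldl_nil, addStep]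
    rw [Int.toNat_natCast, pv_bit, pv_bit]
    have h2pos : (0:Int) < 2 ^ n := by positivity
    have hx01 : a / 2 ^ n % 2 = 0 ∨ a / 2 ^ n % 2 = 1 := Int.emod_two_eq_zero_or_one _
    have hy01 : b / 2 ^ n % 2 = 0 ∨ b / 2 ^ n % 2 = 1 := Int.emod_two_eq_zero_or_one _
    have hra : 0 ≤ a % 2 ^ n := Int.emod_nonneg a (by linarith)
    have hrb : 0 ≤ b % 2 ^ n := Int.emod_nonneg b (by linarith)
    have hla : a % 2 ^ n < 2 ^ n := Int.emod_lt_of_pos a h2pos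
    have hlb : b % 2 ^ n < 2 ^ n := Int.emod_lt_of_pos b h2pos
    have hc01 : (a % 2 ^ n + b % 2 ^ n) / 2 ^ n = 0 ∨ (a % 2 ^ n + b % 2 ^ n) / 2 ^ n = 1 := by
      have hge : 0 ≤ (a % 2 ^ n + b % 2 ^ n) / 2 ^ n := Int.ediv_nonneg (by linarith) (by linarith)
      have hlt : (a % 2 ^ n + b % 2 ^ n) / 2 ^ n < 2 := by
        rw [Int.ediv_lt_iff_lt_mul h2pos]
        linarith
      revert hge hlt
      generalize (a % 2 ^ n + b % 2 ^ n) / 2 ^ n = g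
      intro hge hlt
      omega
    rw [pv_fa _ _ _ hx01 hy01 hc01]
    dsimp only
    have hr0 : 0 ≤ (a % 2 ^ n + b % 2 ^ n) % 2 ^ n := Int.emod_nonneg _ (by linarith)
    have hr1 : (a % 2 ^ n + b % 2 ^ n) % 2 ^ n < 2 ^ n := Int.emod_lt_of_pos _ h2pos
    have hs01 : (a / 2 ^ n % 2 + b / 2 ^ n % 2 + (a % 2 ^ n + b % 2 ^ n) / 2 ^ n) % 2 = 0
        ∨ (a / 2 ^ n % 2 + b / 2 ^ n % 2 + (a % 2 ^ n + b % 2 ^ n) / 2 ^ n) % 2 = 1 :=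
      Int.emod_two_eq_zero_or_one _
    rw [pv_lorAdd _ _ n hr0 hr1 hs01]
    have hpow : (2:Int) ^ (n + 1) = 2 * 2 ^ n := by ring
    rw [hpow]
    have hL := pv_step_arith a b n
    rw [hL]
    have hu1 : (a % 2 ^ n + b % 2 ^ n) % 2 ^ n
        + (a / 2 ^ n % 2 + b / 2 ^ n % 2 + (a % 2 ^ n + b % 2 ^ n) / 2 ^ n) % 2 * 2 ^ n
        < 2 * 2 ^ n := by
      rcases hs01 with h | h <;> rw [h] <;> linarith
    have hu0 : 0 ≤ (a % 2 ^ n + b % 2 ^ n) % 2 ^ n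
        + (a / 2 ^ n % 2 + b / 2 ^ n % 2 + (a % 2 ^ n + b % 2 ^ n) / 2 ^ n) % 2 * 2 ^ n := by
      rcases hs01 with h | h <;> rw [h] <;> linarith
    obtain ⟨hm, hd⟩ := pv_split (2 ^ n) _ _ h2pos hu0 hu1
    simp only [Prod.mk.injEq]
    exact ⟨hm.symm, hd.symm⟩

-- ===== VERDICT (by name: the statement is the Claim_ definition above) =====
theorem add_8bit_spec : Claim_equal_add_8bit := by
  intro a b _
  unfold Spec_add_8bit
  simp only [add_8bit, add_8bit_alt]
  have h : (PySem.List.pyRange 0 8 1).foldl (addStep a b) (0, 0)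
      = ((a % 256 + b % 256) % 256, (a % 256 + b % 256) / 256) := by
    have h8 := pv_inv a b 8
    simp only [Nat.cast_ofNat] at h8
    simpa only [show ((2:Int) ^ 8) = 256 by norm_num] using h8
  rw [h]
  dsimp only
  rw [pv_band255, pv_band255]
  have hc01 : (a % 256 + b % 256) / 256 = 0 ∨ (a % 256 + b % 256) / 256 = 1 := by omega
  have hr0 : 0 ≤ (a % 256 + b % 256) % 256 := by omega
  have hr1 : (a % 256 + b % 256) % 256 < 2 ^ 8 := by norm_num; omega
  rw [pv_lorAdd _ _ 8 hr0 hr1 hc01]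
  have h2 := Int.emod_add_ediv (a % 256 + b % 256) 256
  norm_num
  omega
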